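-- pv_equiv track=rewrite | github.com/MrBrantCode/unitest_baseline | mut_generate/mist_train_cf/cf_16326/solution.py | is_divisible_and_sum_divisible
-- ===== SOURCE A (Python) =====
-- def is_divisible_and_sum_divisible(n):
--     # Check if the input is a number and not negative
--     if not isinstance(n, int) or n < 0:
--         return False
--
--     # Check if the number is divisible by 5
--     if n % 5 != 0:
--         return False
--
--     # Calculate the sum of digits
--     digit_sum = sum(int(digit) for digit in str(n))
--
--     # Check if the sum of digits is divisible by 3
--     if digit_sum % 3 == 0:
--         return True
--     else:
--         return False
-- ===== SOURCE B (Python) =====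
-- def is_divisible_and_sum_divisible(n):
--     # For n >= 0 the digit sum of n is divisible by 3 iff n itself is,
--     # so the string/digit loop collapses to a constant-time arithmetic test.
--     return isinstance(n, int) and n >= 0 and n % 5 == 0 and n % 3 == 0
-- ===== Notes on version B (the rewrite author's own statement) =====
-- stated objective: simpler
-- what changed: Replaces the string conversion and digit-sum loop with the closed-form divisibility-by-3 test n % 3 == 0, valid because for non-negative integers the digit sum is congruent to n mod 3.
import Mathlib
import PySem

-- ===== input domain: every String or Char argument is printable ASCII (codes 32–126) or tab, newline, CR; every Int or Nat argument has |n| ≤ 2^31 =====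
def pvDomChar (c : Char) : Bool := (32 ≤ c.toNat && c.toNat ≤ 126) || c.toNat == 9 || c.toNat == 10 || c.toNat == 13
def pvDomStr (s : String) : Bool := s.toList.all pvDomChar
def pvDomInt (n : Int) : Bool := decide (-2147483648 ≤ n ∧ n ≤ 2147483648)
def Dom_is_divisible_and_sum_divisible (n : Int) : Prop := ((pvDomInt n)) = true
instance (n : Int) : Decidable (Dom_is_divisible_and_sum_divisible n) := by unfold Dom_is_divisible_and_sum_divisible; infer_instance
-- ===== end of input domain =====

-- B replaces A's string-and-digit-sum loop with the closed-form test n % 3 == 0 (simpler; equal outputs).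

-- ===== PORT A =====
-- int(digit) for a single decimal digit character, exact on the digit chars '0'-'9' that
-- str(n) produces for n ≥ 0 (the only place A applies it).
def pvDigitVal (c : Char) : Int := (c.toNat : Int) - 48

def is_divisible_and_sum_divisible (n : Int) : Bool :=
  if ¬ (True) ∨ n < 0 then false            -- `not isinstance(n, int) or n < 0` (n is always an int here)
  else if PySem.Int.mod n 5 ≠ 0 then false
  else
    let digit_sum : Int := ((PySem.Int.toStr n).toList.map pvDigitVal).sum
    if PySem.Int.mod digit_sum 3 = 0 then true else false

-- ===== PORT B =====
def is_divisible_and_sum_divisible_alt (n : Int) : Bool :=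
  decide (0 ≤ n) && decide (PySem.Int.mod n 5 = 0) && decide (PySem.Int.mod n 3 = 0)

-- ===== PRECONDITION & SPEC =====
def Spec_is_divisible_and_sum_divisible (n : Int) (out : Bool) : Prop := out = is_divisible_and_sum_divisible_alt n
instance (n : Int) (out : Bool) : Decidable (Spec_is_divisible_and_sum_divisible n out) := by unfold Spec_is_divisible_and_sum_divisible; infer_instance

-- ===== CLAIM (what is proved, stated in full; the proofs are below) =====
def Claim_equal_is_divisible_and_sum_divisible : Prop := ∀ (n : Int), Dom_is_divisible_and_sum_divisible n → Spec_is_divisible_and_sum_divisible n (is_divisible_and_sum_divisible n)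

-- ===== LEMMAS AND PROOFS =====

-- The integer value of the char produced for one digit d < 10.
theorem pvDigitVal_digitChar (d : Nat) (h : d < 10) : pvDigitVal (Nat.digitChar d) = (d : Int) := by
  interval_cases d <;> decide

-- Invariant of Nat.toDigitsCore: the digit-value sum of the output is congruent
-- mod 3 to n plus the digit-value sum of the accumulator.
theorem sum_toDigitsCore_mod3 (fuel : Nat) : ∀ (n : Nat) (ds : List Char), n < fuel →
    ((Nat.toDigitsCore 10 fuel n ds).map pvDigitVal).sum % 3 = ((n : Int) + (ds.map pvDigitVal).sum) % 3 := by
  induction fuel with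
  | zero => intro n ds h; omega
  | succ fuel ih =>
    intro n ds h
    rw [Nat.toDigitsCore]
    have hd : pvDigitVal (Nat.digitChar (n % 10)) = ((n % 10 : Nat) : Int) :=
      pvDigitVal_digitChar _ (Nat.mod_lt _ (by norm_num))
    have hsplit : n = 10 * (n / 10) + n % 10 := (Nat.div_add_mod' n 10).symm ▸ by omega
    by_cases h0 : n / 10 = 0
    · simp [h0, hd]
      omega
    · have hlt : n / 10 < fuel := by
        have h1 : n / 10 < n := Nat.div_lt_self (by omega) (by norm_num)
        omega
      rw [if_neg h0, ih (n / 10) (Nat.digitChar (n % 10) :: ds) hlt]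
      simp [hd]
      omega

-- For n ≥ 0, the digit-value sum of str(n) is congruent to n mod 3.
theorem digitSum_mod3 (n : Int) (h : 0 ≤ n) :
    (((PySem.Int.toStr n).toList.map pvDigitVal).sum) % 3 = n % 3 := by
  rw [PySem.Int.toList_toStr]
  unfold PySem.Int.toChars
  rw [if_neg (by omega)]
  unfold Nat.toDigits
  rw [sum_toDigitsCore_mod3 (n.toNat + 1) n.toNat [] (by omega)]
  simp
  omega

theorem fmod_eq_emod_of_nonneg (a b : Int) (hb : 0 < b) : PySem.Int.mod a b = a % b := by
  unfold PySem.Int.mod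
  rw [Int.fmod_eq_emod_of_nonneg _ (le_of_lt hb)]

-- ===== VERDICT (by name: the statement is the Claim_ definition above) =====
theorem is_divisible_and_sum_divisible_spec : Claim_equal_is_divisible_and_sum_divisible := by
  intro n _
  unfold Spec_is_divisible_and_sum_divisible
  unfold is_divisible_and_sum_divisible is_divisible_and_sum_divisible_alt
  by_cases hneg : n < 0
  · simp only [hneg, or_true, if_true]
    have : ¬ (0 ≤ n) := by omega
    simp [this]
  · push Not at hneg
    rw [if_neg (by simpa using not_lt.mpr hneg)]
    rw [fmod_eq_emod_of_nonneg n 5 (by norm_num)]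
    by_cases h5 : n % 5 = 0
    · rw [if_neg (by simpa using h5)]
      simp only [fmod_eq_emod_of_nonneg _ 3 (by norm_num), digitSum_mod3 n hneg]
      by_cases h3 : n % 3 = 0 <;> simp [h3, hneg, h5]
    · simp [h5, hneg]
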